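-- pv_equiv track=rewrite | github.com/SiulRek/pcb-defect-detection | temporary_folder/tasks/helpers/for_cleanup/separate_imports.py | separate_imports
-- ===== SOURCE A (Python) =====
-- def separate_imports(code_text):
--     """
--     Reads Python code from a string and separates the lines into import
--     statements and other code.
--
--     This function handles both single-line and multi-line import statements.
--     Multi-line imports are assumed to start with 'from ... import (' or 'import
--     (' and end with ')'. Lines that are part of a multi-line import statement
--     are grouped together in the import list. All other lines, including blank
--     lines outside of import statements, are categorized separately.
--
--     Args:
--         - code_text (str): A string containing Python code.
--
--     Returns:
--         - tuple: A tuple containing two lists: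
--             - First list contains lines that are import statements.
--             - Second list contains all other lines.
--     """
--     import_statements = []
--     other_code = ""
--     previous_line_is_import = False
--
--     lines = iter(code_text.splitlines(keepends=True))
--
--     try:
--         while True:
--             line = next(lines)
--             stripped_line = line.strip()
--             if stripped_line.startswith("import ") or stripped_line.startswith("from "):
--                 import_statement = line
--                 previous_line_is_import = True
--                 if "(" in line and ")" not in line:
--                     continue_reading_import = True
--                     while continue_reading_import:
--                         try:
--                             line = next(lines)
--                             import_statement += line
--                             if ")" in line:
--                                 continue_reading_import = False
--                         except StopIteration:
--                             continue_reading_import = False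
--                 import_statements.append(import_statement.strip())
--             else:
--                 if not previous_line_is_import or not line.strip() == "":
--                     other_code += line
--                 if line.strip():
--                     previous_line_is_import = False
--     except StopIteration:
--         pass
--
--     return import_statements, other_code
-- ===== SOURCE B (Python) =====
-- def separate_imports(code_text):
--     lines = code_text.splitlines(keepends=True)
--
--     # Pass 1: lex the lines into tagged units (is_import, merged_text).
--     units = []
--     i = 0
--     n = len(lines)
--     while i < n:
--         line = lines[i]
--         i += 1
--         stripped = line.strip()
--         if stripped.startswith("import ") or stripped.startswith("from "):
--             merged = line
--             if "(" in line and ")" not in line: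
--                 while i < n:
--                     merged += lines[i]
--                     done = ")" in lines[i]
--                     i += 1
--                     if done:
--                         break
--             units.append((True, merged))
--         else:
--             units.append((False, line))
--
--     # Pass 2: classify the units, with the blank-suppression state machine.
--     import_statements = []
--     other_parts = []
--     prev_import = False
--     for is_imp, text in units:
--         if is_imp:
--             import_statements.append(text.strip())
--             prev_import = True
--         else:
--             blank = text.strip() == ""
--             if not (prev_import and blank):
--                 other_parts.append(text)
--             if not blank:
--                 prev_import = False
--     return import_statements, "".join(other_parts)
-- ===== Notes on version B (the rewrite author's own statement) =====
-- stated objective: alternative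
-- what changed: A's single interleaved iterator loop (classify, merge multi-line imports, and emit, all in one while/try with shared mutable state) is replaced by two separate passes: a lexing pass that merges multi-line imports into tagged (is_import, text) units, then a classification pass over the units that builds the import list and joins the other-code parts at the end.
import Mathlib
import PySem

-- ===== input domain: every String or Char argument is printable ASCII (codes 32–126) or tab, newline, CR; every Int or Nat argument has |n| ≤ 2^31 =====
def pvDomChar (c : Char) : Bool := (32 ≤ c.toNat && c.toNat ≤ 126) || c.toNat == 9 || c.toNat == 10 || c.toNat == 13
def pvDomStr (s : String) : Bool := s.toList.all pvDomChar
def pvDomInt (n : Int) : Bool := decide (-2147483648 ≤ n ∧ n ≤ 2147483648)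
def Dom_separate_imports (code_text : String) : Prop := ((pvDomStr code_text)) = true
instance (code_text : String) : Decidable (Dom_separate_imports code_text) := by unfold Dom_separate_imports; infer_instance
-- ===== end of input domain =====

-- B restructures A's single interleaved loop into two passes (lex into tagged units, then classify);
-- objective: alternative decomposition, same cost.

-- shared hand port of str.splitlines(keepends=True): exact on Dom (there the only line breaks are '\n', '\r', '\r\n')
def pvSplitKeep : List Char → List Char → List (List Char)
  | acc, [] => if acc.isEmpty then [] else [acc.reverse]
  | acc, '\r' :: '\n' :: rest => (acc.reverse ++ ['\r', '\n']) :: pvSplitKeep [] rest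
  | acc, '\n' :: rest => (acc.reverse ++ ['\n']) :: pvSplitKeep [] rest
  | acc, '\r' :: rest => (acc.reverse ++ ['\r']) :: pvSplitKeep [] rest
  | acc, c :: rest => pvSplitKeep (c :: acc) rest

-- ===== PORT A =====
-- A's inner 'while continue_reading_import' loop: merge following lines until one contains ')' (or EOF)
def aConsume : List Char → List (List Char) → List Char × List (List Char)
  | acc, [] => (acc, [])
  | acc, l :: rest =>
    if PySem.Chars.isIn [')'] l then (acc ++ l, rest) else aConsume (acc ++ l) rest

theorem aConsume_len : ∀ (rest : List (List Char)) (acc : List Char),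
    (aConsume acc rest).2.length ≤ rest.length := by
  intro rest
  induction rest with
  | nil => intro acc; simp [aConsume]
  | cons l rest ih =>
      intro acc
      simp only [aConsume]
      split
      · simp
      · exact (ih _).trans (by simp)

-- A's main 'while True' loop over the line iterator, with its three pieces of state
def aLoop (lines : List (List Char)) (imps : List (List Char)) (other : List Char)
    (prev : Bool) : List (List Char) × List Char :=
  match lines with
  | [] => (imps, other)
  | line :: rest =>
    let st := PySem.Chars.strip line
    if PySem.Chars.startswith st "import ".toList || PySem.Chars.startswith st "from ".toList then
      if PySem.Chars.isIn ['('] line && !(PySem.Chars.isIn [')'] line) then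
        let c := aConsume line rest
        aLoop c.2 (imps ++ [PySem.Chars.strip c.1]) other true
      else
        aLoop rest (imps ++ [PySem.Chars.strip line]) other true
    else
      aLoop rest imps
        (if !prev || !(PySem.Chars.strip line).isEmpty then other ++ line else other)
        (if (PySem.Chars.strip line).isEmpty then prev else false)
termination_by lines.length
decreasing_by
  · simpa using Nat.lt_succ_of_le (aConsume_len rest line)
  · simp
  · simp

def separate_imports (code_text : String) : List String × String :=
  let r := aLoop (pvSplitKeep [] code_text.toList) [] [] false
  (r.1.map fun l => String.ofList l, String.ofList r.2)

-- ===== PORT B =====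
-- Source B pass-1 inner merge loop
def bConsume : List Char → List (List Char) → List Char × List (List Char)
  | merged, [] => (merged, [])
  | merged, l :: rest =>
    if PySem.Chars.isIn [')'] l then (merged ++ l, rest) else bConsume (merged ++ l) rest

theorem bConsume_len : ∀ (rest : List (List Char)) (merged : List Char),
    (bConsume merged rest).2.length ≤ rest.length := by
  intro rest
  induction rest with
  | nil => intro m; simp [bConsume]
  | cons l rest ih =>
      intro m
      simp only [bConsume]
      split
      · simp
      · exact (ih _).trans (by simp)

-- Source B pass 1: lex the lines into tagged units (is_import, merged_text)
def bTokenize (lines : List (List Char)) : List (Bool × List Char) :=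
  match lines with
  | [] => []
  | line :: rest =>
    let stripped := PySem.Chars.strip line
    if PySem.Chars.startswith stripped "import ".toList || PySem.Chars.startswith stripped "from ".toList then
      if PySem.Chars.isIn ['('] line && !(PySem.Chars.isIn [')'] line) then
        let c := bConsume line rest
        (true, c.1) :: bTokenize c.2
      else
        (true, line) :: bTokenize rest
    else
      (false, line) :: bTokenize rest
termination_by lines.length
decreasing_by
  · simpa using Nat.lt_succ_of_le (bConsume_len rest line)
  · simp
  · simp

-- Source B pass 2: classify the units (forward loop with accumulators; join at the end)
def bEmit : List (Bool × List Char) → List (List Char) → List (List Char) → Bool →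
    List (List Char) × List (List Char)
  | [], imps, parts, _ => (imps, parts)
  | (true, s) :: rest, imps, parts, _ =>
      bEmit rest (imps ++ [PySem.Chars.strip s]) parts true
  | (false, s) :: rest, imps, parts, prev =>
      bEmit rest imps
        (if prev && (PySem.Chars.strip s).isEmpty then parts else parts ++ [s])
        (if (PySem.Chars.strip s).isEmpty then prev else false)

def separate_imports_alt (code_text : String) : List String × String :=
  let r := bEmit (bTokenize (pvSplitKeep [] code_text.toList)) [] [] false
  (r.1.map fun l => String.ofList l, String.ofList r.2.flatten)

-- ===== PRECONDITION & SPEC =====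
def Spec_separate_imports (code_text : String) (out : List String × String) : Prop := out = separate_imports_alt code_text
instance (code_text : String) (out : List String × String) : Decidable (Spec_separate_imports code_text out) := by unfold Spec_separate_imports; infer_instance

-- ===== CLAIM (what is proved, stated in full; the proofs are below) =====
def Claim_equal_separate_imports : Prop := ∀ (code_text : String), Dom_separate_imports code_text → Spec_separate_imports code_text (separate_imports code_text)

-- ===== LEMMAS AND PROOFS =====

-- proof-side denotation of pass 2: the (imports, other_code) a unit list contributes
def emitP : List (Bool × List Char) → Bool → List (List Char) × List Char
  | [], _ => ([], [])
  | (true, s) :: rest, _ =>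
      let p := emitP rest true
      (PySem.Chars.strip s :: p.1, p.2)
  | (false, s) :: rest, prev =>
      let p := emitP rest (if (PySem.Chars.strip s).isEmpty then prev else false)
      (p.1, (if prev && (PySem.Chars.strip s).isEmpty then [] else s) ++ p.2)

theorem consume_eq : ∀ (rest : List (List Char)) (acc : List Char),
    bConsume acc rest = aConsume acc rest := by
  intro rest
  induction rest with
  | nil => intro acc; rfl
  | cons l rest ih =>
      intro acc
      simp only [aConsume, bConsume]
      split
      · rfl
      · exact ih _

theorem bEmit_spec : ∀ (units : List (Bool × List Char)) (imps parts : List (List Char)) (prev : Bool),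
    (bEmit units imps parts prev).1 = imps ++ (emitP units prev).1 ∧
    (bEmit units imps parts prev).2.flatten = parts.flatten ++ (emitP units prev).2 := by
  intro units
  induction units with
  | nil => intro imps parts prev; simp [bEmit, emitP]
  | cons u rest ih =>
      intro imps parts prev
      obtain ⟨b, s⟩ := u
      cases b with
      | true =>
          simp only [bEmit, emitP]
          obtain ⟨h1, h2⟩ := ih (imps ++ [PySem.Chars.strip s]) parts true
          exact ⟨by simp [h1], by simp [h2]⟩
      | false =>
          simp only [bEmit, emitP]
          by_cases hb : (PySem.Chars.strip s).isEmpty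
          · by_cases hp : prev
            · obtain ⟨h1, h2⟩ := ih imps parts (if (PySem.Chars.strip s).isEmpty then prev else false)
              simp only [hb, hp] at *
              exact ⟨by simpa using h1, by simpa using h2⟩
            · obtain ⟨h1, h2⟩ := ih imps (parts ++ [s]) (if (PySem.Chars.strip s).isEmpty then prev else false)
              simp only [hb, hp] at *
              exact ⟨by simpa using h1, by simp at h2; simp [h2]⟩
          · obtain ⟨h1, h2⟩ := ih imps (parts ++ [s]) (if (PySem.Chars.strip s).isEmpty then prev else false)
            simp only [hb] at *
            exact ⟨by simpa using h1, by simp at h2; simp [h2]⟩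

theorem aLoop_spec : ∀ (n : Nat) (lines : List (List Char)), lines.length ≤ n →
    ∀ (imps : List (List Char)) (other : List Char) (prev : Bool),
    aLoop lines imps other prev =
      (imps ++ (emitP (bTokenize lines) prev).1, other ++ (emitP (bTokenize lines) prev).2) := by
  intro n
  induction n with
  | zero =>
      intro lines hl imps other prev
      have : lines = [] := List.length_eq_zero_iff.mp (Nat.le_zero.mp hl)
      subst this
      simp [aLoop, bTokenize, emitP]
  | succ n ih =>
      intro lines hl imps other prev
      match lines with
      | [] => simp [aLoop, bTokenize, emitP]
      | line :: rest =>
        have hr : rest.length ≤ n := by simpa using Nat.succ_le_succ_iff.mp hl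
        rw [aLoop, bTokenize]
        by_cases himp : (PySem.Chars.startswith (PySem.Chars.strip line) "import ".toList
            || PySem.Chars.startswith (PySem.Chars.strip line) "from ".toList) = true
        · simp only [himp, if_pos]
          by_cases hpar : (PySem.Chars.isIn ['('] line && !(PySem.Chars.isIn [')'] line)) = true
          · simp only [hpar, if_pos, consume_eq]
            have hc : (aConsume line rest).2.length ≤ n := (aConsume_len rest line).trans hr
            rw [ih _ hc]
            simp [emitP]
          · simp only [Bool.not_eq_true] at hpar
            simp only [hpar]
            rw [ih _ hr]
            simp [emitP]
        · simp only [Bool.not_eq_true] at himp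
          simp only [himp]
          by_cases hb : (PySem.Chars.strip line).isEmpty <;>
            by_cases hp : prev <;>
            simp [emitP, hb, hp, ih _ hr, List.append_assoc]

-- ===== VERDICT (by name: the statement is the Claim_ definition above) =====
theorem separate_imports_spec : Claim_equal_separate_imports := by
  intro code_text _
  unfold Spec_separate_imports separate_imports separate_imports_alt
  obtain ⟨h1, h2⟩ := bEmit_spec (bTokenize (pvSplitKeep [] code_text.toList)) [] [] false
  rw [aLoop_spec (pvSplitKeep [] code_text.toList).length _ le_rfl]
  simp [h1, h2]
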